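-- pv_equiv track=rewrite | github.com/BolinQiu/Host-based-Intrusion-Detection-System | Graph_construction.py | ip2higlist
-- ===== SOURCE A (Python) =====
-- def ip2higlist(ip):
--     '''
--         1. 对IP地址而言，我们取IP地址的子串进行特征编码，比如：
--         192.168.1.1 -> ['192', '192.168', '192.168.1', '192.168.1.1']
--         2. 对这些子串分别进行编码[hash(i) for i in substrings]，得到特征向量，作为节点的特征
--
--         该函数为子串提取函数。
--         :param ip: IP address
--         :return: substrings
--     '''
--     substrings = []
--     elements = ip.strip().split('.')
--     for i in elements:
--         if len(substrings) != 0: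
--             substrings.append(substrings[-1] + '.' + i)
--         else:
--             substrings.append(i)
--     return substrings
-- ===== SOURCE B (Python) =====
-- def ip2higlist(ip):
--     elements = ip.strip().split('.')
--     return ['.'.join(elements[:i + 1]) for i in range(len(elements))]
-- ===== Notes on version B (the rewrite author's own statement) =====
-- stated objective: idiomatic
-- what changed: A extends a running accumulator (each new prefix = previous result's last element plus dot plus octet); B splits once and builds every prefix independently by dot-joining a growing slice of the octet list, with no carried state.
import Mathlib
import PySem

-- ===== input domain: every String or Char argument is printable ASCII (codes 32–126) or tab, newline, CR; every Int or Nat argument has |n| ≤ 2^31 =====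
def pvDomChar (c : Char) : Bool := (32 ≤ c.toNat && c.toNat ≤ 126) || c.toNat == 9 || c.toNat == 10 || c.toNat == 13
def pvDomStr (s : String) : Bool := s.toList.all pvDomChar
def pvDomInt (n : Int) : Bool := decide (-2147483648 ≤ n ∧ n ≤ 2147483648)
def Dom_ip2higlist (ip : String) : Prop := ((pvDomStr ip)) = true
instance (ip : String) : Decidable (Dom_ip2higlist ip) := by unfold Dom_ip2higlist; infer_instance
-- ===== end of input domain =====

-- B replaces A's running-accumulator loop by an idiomatic stateless comprehension: each prefix is rebuilt by dot-joining a slice of the octet list.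

-- ===== PORT A =====
def ip2higlist (ip : String) : List String :=
  (((PySem.Str.split? (PySem.Str.strip ip) ".").getD [])).foldl
    (fun substrings i =>
      if substrings.length ≠ 0 then
        substrings ++ [((PySem.List.pyGet? substrings (-1)).getD "") ++ "." ++ i]
      else
        substrings ++ [i]) []

-- ===== PORT B =====
def ip2higlist_alt (ip : String) : List String :=
  let elements := ((PySem.Str.split? (PySem.Str.strip ip) ".").getD [])
  (PySem.List.pyRange 0 (elements.length : Int) 1).map
    (fun i => PySem.Str.join "." (PySem.List.slice elements none (some (i + 1))))

-- ===== PRECONDITION & SPEC =====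
def Spec_ip2higlist (ip : String) (out : List String) : Prop := out = ip2higlist_alt ip
instance (ip : String) (out : List String) : Decidable (Spec_ip2higlist ip out) := by unfold Spec_ip2higlist; infer_instance

-- ===== CLAIM (what is proved, stated in full; the proofs are below) =====
def Claim_equal_ip2higlist : Prop := ∀ (ip : String), Dom_ip2higlist ip → Spec_ip2higlist ip (ip2higlist ip)

-- ===== LEMMAS AND PROOFS =====

-- the cumulative-prefix list both programs compute, as a structural recursion
def pvPrefFrom (s : String) : List String → List String
  | [] => []
  | i :: rest => (s ++ "." ++ i) :: pvPrefFrom (s ++ "." ++ i) rest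

def pvPref : List String → List String
  | [] => []
  | x :: xs => x :: pvPrefFrom x xs

theorem pv_pyGet_neg_one_last (l : List String) (s : String) (h : l.getLast? = some s) :
    (PySem.List.pyGet? l (-1)).getD "" = s := by
  have hne : l ≠ [] := by rintro rfl; simp at h
  have hlen : 1 ≤ l.length := List.length_pos_iff.mpr hne
  simp [PySem.List.pyGet?, PySem.List.pyIdx?, hlen, ← List.getLast?_eq_getElem?, h]

theorem pv_join_singleton (sep x : String) : PySem.Str.join sep [x] = x := by
  rw [← String.toList_inj]
  simp [PySem.Str.toList_join, PySem.Chars.join_singleton]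

theorem pv_join_cons (sep x : String) (l : List String) (h : l ≠ []) :
    PySem.Str.join sep (x :: l) = x ++ sep ++ PySem.Str.join sep l := by
  obtain ⟨y, r, rfl⟩ := List.exists_cons_of_ne_nil h
  rw [← String.toList_inj]
  simp [PySem.Str.toList_join, PySem.Chars.join_cons_cons]

-- A's fold, from a nonempty accumulator whose last element is s, appends pvPrefFrom s
theorem pv_foldA (es : List String) : ∀ (acc : List String) (s : String),
    acc.getLast? = some s →
    es.foldl (fun substrings i =>
      if substrings.length ≠ 0 then
        substrings ++ [((PySem.List.pyGet? substrings (-1)).getD "") ++ "." ++ i]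
      else
        substrings ++ [i]) acc = acc ++ pvPrefFrom s es := by
  induction es with
  | nil => intro acc s _; simp [pvPrefFrom]
  | cons i rest ih =>
    intro acc s h
    have hne : acc ≠ [] := by rintro rfl; simp at h
    have hlen : acc.length ≠ 0 := fun h0 => hne (List.length_eq_zero_iff.mp h0)
    simp only [List.foldl_cons, if_pos hlen, pv_pyGet_neg_one_last acc s h]
    rw [ih (acc ++ [s ++ "." ++ i]) (s ++ "." ++ i) (by simp)]
    simp [pvPrefFrom]

theorem pv_A_eq_pref (es : List String) :
    es.foldl (fun substrings i =>
      if substrings.length ≠ 0 then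
        substrings ++ [((PySem.List.pyGet? substrings (-1)).getD "") ++ "." ++ i]
      else
        substrings ++ [i]) [] = pvPref es := by
  cases es with
  | nil => simp [pvPref]
  | cons x xs =>
    simp only [List.foldl_cons, List.length_nil, ne_eq, not_true_eq_false, if_false,
      List.nil_append]
    rw [pv_foldA xs [x] x (by simp), pvPref]
    simp

-- B's slice-and-join comprehension, shifted by a prefix s, is pvPrefFrom s
theorem pv_B_from (es : List String) : ∀ (s : String),
    (List.range es.length).map (fun k => s ++ "." ++ PySem.Str.join "." (es.take (k + 1)))
      = pvPrefFrom s es := by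
  induction es with
  | nil => intro s; simp [pvPrefFrom]
  | cons y ys ih =>
    intro s
    rw [List.length_cons, List.range_succ_eq_map, List.map_cons, List.map_map]
    have h1 : s ++ "." ++ PySem.Str.join "." ((y :: ys).take (0 + 1)) = s ++ "." ++ y := by
      simp [pv_join_singleton]
    rw [h1, pvPrefFrom]
    congr 1
    rw [← ih (s ++ "." ++ y)]
    apply List.map_congr_left
    intro k hk
    have hk' : k < ys.length := List.mem_range.mp hk
    have htk : ys.take (k + 1) ≠ [] := by
      have : (ys.take (k + 1)).length = k + 1 := by
        rw [List.length_take]; omega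
      intro hnil; rw [hnil] at this; simp at this
    simp only [Function.comp_apply, Nat.succ_eq_add_one, List.take_succ_cons,
      pv_join_cons "." y _ htk, String.append_assoc]

theorem pv_B_eq_pref (es : List String) :
    (PySem.List.pyRange 0 (es.length : Int) 1).map
      (fun i => PySem.Str.join "." (PySem.List.slice es none (some (i + 1)))) = pvPref es := by
  rw [PySem.List.pyRange_zero_nat, List.map_map]
  cases es with
  | nil => simp [pvPref]
  | cons x xs =>
    rw [List.length_cons, List.range_succ_eq_map, List.map_cons, List.map_map]
    have h0 : ∀ (k : Nat), PySem.List.slice (x :: xs) none (some ((k : Int) + 1))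
        = (x :: xs).take (k + 1) := by
      intro k
      have : (k : Int) + 1 = ((k + 1 : Nat) : Int) := by push_cast; ring
      rw [this, PySem.List.slice_to_natCast]
    simp only [Function.comp_apply, h0]
    rw [pvPref]
    congr 1
    · simp [pv_join_singleton]
    rw [← pv_B_from xs x]
    apply List.map_congr_left
    intro k hk
    have hk' : k < xs.length := List.mem_range.mp hk
    have htk : xs.take (k + 1) ≠ [] := by
      have : (xs.take (k + 1)).length = k + 1 := by rw [List.length_take]; omega
      intro hnil; rw [hnil] at this; simp at this
    simp only [Function.comp_apply, Nat.succ_eq_add_one, h0, List.take_succ_cons,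
      pv_join_cons "." x _ htk]

-- ===== VERDICT (by name: the statement is the Claim_ definition above) =====
theorem ip2higlist_spec : Claim_equal_ip2higlist := by
  intro ip _
  unfold Spec_ip2higlist ip2higlist ip2higlist_alt
  rw [pv_A_eq_pref, pv_B_eq_pref]
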